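-- pv_equiv track=rewrite | github.com/jhleepidl/graph-of-context | scripts/run_phase2_openai_parallel_bundle.py | _choose_k_main
-- ===== SOURCE A (Python) =====
-- from typing import Dict, List, Optional, Tuple
--
-- def _choose_k_main(
--     ordered_threads: List[str],
--     counts: Dict[str, int],
--     lo: int = 80,
--     hi: int = 120,
--     target: int = 100,
-- ) -> Tuple[int, int]:
--     total = 0
--     for idx, tid in enumerate(ordered_threads, start=1):
--         total += int(counts.get(tid, 0))
--         if lo <= total <= hi:
--             return idx, total
--
--     # Fallback if an exact in-range prefix doesn't exist.
--     running = 0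
--     best = (0, 0, 10**9)  # k, total, distance
--     for idx, tid in enumerate(ordered_threads, start=1):
--         running += int(counts.get(tid, 0))
--         if running > hi:
--             break
--         dist = abs(running - target)
--         if dist < best[2]:
--             best = (idx, running, dist)
--     if best[0] > 0:
--         return best[0], best[1]
--     # If everything exceeded hi early or not enough tasks, return all threads.
--     total_all = sum(int(counts.get(tid, 0)) for tid in ordered_threads)
--     return len(ordered_threads), total_all
-- ===== SOURCE B (Python) =====
-- def _choose_k_main(ordered_threads, counts, lo=80, hi=120, target=100):
--     total = 0
--     best = (0, 0, 10**9)  # k, total, distance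
--     fallback_open = True
--     for idx, tid in enumerate(ordered_threads, start=1):
--         total += int(counts.get(tid, 0))
--         if lo <= total <= hi:
--             return idx, total
--         if fallback_open:
--             if total > hi:
--                 fallback_open = False
--             else:
--                 dist = abs(total - target)
--                 if dist < best[2]:
--                     best = (idx, total, dist)
--     if best[0] > 0:
--         return best[0], best[1]
--     return len(ordered_threads), total
-- ===== Notes on version B (the rewrite author's own statement) =====
-- stated objective: alternative
-- what changed: Replaces A's three traversals (in-range scan, fallback best-distance scan with break, and a full generator re-sum) with one single pass maintaining the running total, the best fallback candidate and an open/closed flag, reusing the final total as the all-threads sum.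
import Mathlib
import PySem

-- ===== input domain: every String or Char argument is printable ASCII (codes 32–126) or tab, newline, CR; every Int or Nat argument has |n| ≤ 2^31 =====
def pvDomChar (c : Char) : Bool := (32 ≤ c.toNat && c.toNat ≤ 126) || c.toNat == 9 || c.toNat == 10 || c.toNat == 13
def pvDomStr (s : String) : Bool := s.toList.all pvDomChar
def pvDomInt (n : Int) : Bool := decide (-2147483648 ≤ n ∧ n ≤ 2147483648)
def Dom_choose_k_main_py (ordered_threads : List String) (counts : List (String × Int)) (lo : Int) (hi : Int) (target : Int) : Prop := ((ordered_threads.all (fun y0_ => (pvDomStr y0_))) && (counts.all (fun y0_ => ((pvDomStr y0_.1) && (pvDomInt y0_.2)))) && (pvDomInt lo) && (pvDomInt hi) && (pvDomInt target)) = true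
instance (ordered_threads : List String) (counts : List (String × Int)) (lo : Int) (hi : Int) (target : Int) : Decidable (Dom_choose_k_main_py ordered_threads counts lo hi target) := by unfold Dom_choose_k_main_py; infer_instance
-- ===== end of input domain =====

-- B replaces A's three traversals (range scan, fallback scan, re-sum) with one single pass maintaining total, best and an open flag (alternative decomposition).


-- ===== PORT A =====
-- first loop: return first prefix (idx, total) with lo ≤ total ≤ hi
def chooseKLoop1 (counts : List (String × Int)) (lo hi : Int) :
    List String → Int → Int → Option (Int × Int)
  | [], _, _ => none
  | tid :: rest, idx, total =>
    let total' := total + PySem.Dict.getD (PySem.Dict.mk counts) tid 0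
    if lo ≤ total' ∧ total' ≤ hi then some (idx, total')
    else chooseKLoop1 counts lo hi rest (idx + 1) total'

-- second loop: best = (k, total, distance); break when running > hi
def chooseKLoop2 (counts : List (String × Int)) (hi target : Int) :
    List String → Int → Int → Int × Int × Int → Int × Int × Int
  | [], _, _, best => best
  | tid :: rest, idx, running, best =>
    let running' := running + PySem.Dict.getD (PySem.Dict.mk counts) tid 0
    if running' > hi then best
    else
      let dist := |running' - target|
      let best' := if dist < best.2.2 then (idx, running', dist) else best
      chooseKLoop2 counts hi target rest (idx + 1) running' best'

-- sum(int(counts.get(tid, 0)) for tid in ordered_threads)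
def chooseKSumAll (counts : List (String × Int)) (ordered_threads : List String) : Int :=
  (ordered_threads.map (fun tid => PySem.Dict.getD (PySem.Dict.mk counts) tid 0)).sum

def choose_k_main_py (ordered_threads : List String) (counts : List (String × Int)) (lo : Int) (hi : Int) (target : Int) : Int × Int :=
  match chooseKLoop1 counts lo hi ordered_threads 1 0 with
  | some r => r
  | none =>
    let best := chooseKLoop2 counts hi target ordered_threads 1 0 (0, 0, 10 ^ 9)
    if best.1 > 0 then (best.1, best.2.1)
    else ((ordered_threads.length : Int), chooseKSumAll counts ordered_threads)

-- ===== PORT B =====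
-- single pass: Sum.inl = early in-range return, Sum.inr = (best, final total)
def chooseKAltLoop (counts : List (String × Int)) (lo hi target : Int) :
    List String → Int → Int → Int × Int × Int → Bool → (Int × Int) ⊕ ((Int × Int × Int) × Int)
  | [], _, total, best, _ => Sum.inr (best, total)
  | tid :: rest, idx, total, best, fallbackOpen =>
    let total' := total + PySem.Dict.getD (PySem.Dict.mk counts) tid 0
    if lo ≤ total' ∧ total' ≤ hi then Sum.inl (idx, total')
    else if fallbackOpen then
      if total' > hi then
        chooseKAltLoop counts lo hi target rest (idx + 1) total' best false
      else
        let dist := |total' - target|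
        let best' := if dist < best.2.2 then (idx, total', dist) else best
        chooseKAltLoop counts lo hi target rest (idx + 1) total' best' true
    else chooseKAltLoop counts lo hi target rest (idx + 1) total' best false

def choose_k_main_py_alt (ordered_threads : List String) (counts : List (String × Int)) (lo : Int) (hi : Int) (target : Int) : Int × Int :=
  match chooseKAltLoop counts lo hi target ordered_threads 1 0 (0, 0, 10 ^ 9) true with
  | Sum.inl r => r
  | Sum.inr (best, total) =>
    if best.1 > 0 then (best.1, best.2.1)
    else ((ordered_threads.length : Int), total)

-- ===== PRECONDITION & SPEC =====
def Spec_choose_k_main_py (ordered_threads : List String) (counts : List (String × Int)) (lo : Int) (hi : Int) (target : Int) (out : Int × Int) : Prop := out = choose_k_main_py_alt ordered_threads counts lo hi target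
instance (ordered_threads : List String) (counts : List (String × Int)) (lo : Int) (hi : Int) (target : Int) (out : Int × Int) : Decidable (Spec_choose_k_main_py ordered_threads counts lo hi target out) := by unfold Spec_choose_k_main_py; infer_instance

-- ===== CLAIM (what is proved, stated in full; the proofs are below) =====
def Claim_equal_choose_k_main_py : Prop := ∀ (ordered_threads : List String) (counts : List (String × Int)) (lo : Int) (hi : Int) (target : Int), Dom_choose_k_main_py ordered_threads counts lo hi target → Spec_choose_k_main_py ordered_threads counts lo hi target (choose_k_main_py ordered_threads counts lo hi target)

-- ===== LEMMAS AND PROOFS =====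

-- the single pass simulates loop1, and on failure yields loop2's best (when open) and the full sum
theorem chooseKAltLoop_eq (counts : List (String × Int)) (lo hi target : Int) :
    ∀ (ts : List String) (idx total : Int) (best : Int × Int × Int) (o : Bool),
      chooseKAltLoop counts lo hi target ts idx total best o =
        match chooseKLoop1 counts lo hi ts idx total with
        | some r => Sum.inl r
        | none =>
            Sum.inr ((if o then chooseKLoop2 counts hi target ts idx total best else best),
                     total + chooseKSumAll counts ts) := by
  intro ts
  induction ts with
  | nil => intro idx total best o; simp [chooseKAltLoop, chooseKLoop1, chooseKLoop2, chooseKSumAll]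
  | cons tid rest ih =>
    intro idx total best o
    simp only [chooseKAltLoop, chooseKLoop1, chooseKLoop2, chooseKSumAll, List.map_cons,
      List.sum_cons]
    by_cases hin : lo ≤ total + PySem.Dict.getD (PySem.Dict.mk counts) tid 0 ∧ total + PySem.Dict.getD (PySem.Dict.mk counts) tid 0 ≤ hi
    · simp [hin]
    · cases o with
      | false =>
        simp only [hin, if_false, Bool.false_eq_true, ih]
        cases chooseKLoop1 counts lo hi rest (idx + 1) (total + PySem.Dict.getD (PySem.Dict.mk counts) tid 0) with
        | some r => simp
        | none => simp [chooseKSumAll]; ring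
      | true =>
        by_cases hgt : total + PySem.Dict.getD (PySem.Dict.mk counts) tid 0 > hi
        · simp only [hin, if_pos hgt, ih]
          cases chooseKLoop1 counts lo hi rest (idx + 1) (total + PySem.Dict.getD (PySem.Dict.mk counts) tid 0) with
          | some r => simp
          | none => simp [chooseKSumAll]; ring
        · simp only [hin, if_neg hgt, ih]
          cases chooseKLoop1 counts lo hi rest (idx + 1) (total + PySem.Dict.getD (PySem.Dict.mk counts) tid 0) with
          | some r => simp
          | none => simp [chooseKSumAll]; ring

-- ===== VERDICT (by name: the statement is the Claim_ definition above) =====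
theorem choose_k_main_py_spec : Claim_equal_choose_k_main_py := by
  intro ordered_threads counts lo hi target _
  unfold Spec_choose_k_main_py choose_k_main_py choose_k_main_py_alt
  rw [chooseKAltLoop_eq]
  cases chooseKLoop1 counts lo hi ordered_threads 1 0 with
  | some r => rfl
  | none => simp
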